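-- pv_equiv track=rewrite | github.com/petrobras/GeoSlicer | src/ltrace/ltrace/file_utils.py | count_outside_quotes
-- ===== SOURCE A (Python) =====
-- def count_outside_quotes(string, char):
--     count = 0
--     in_quotes = False
--     for c in string:
--         if c == '"':
--             in_quotes = not in_quotes
--         elif c == char and not in_quotes:
--             count += 1
--     return count
-- ===== SOURCE B (Python) =====
-- def count_outside_quotes(string, char):
--     total = 0
--     for i, seg in enumerate(string.split('"')):
--         if i % 2 == 0:
--             total += sum(1 for c in seg if c == char)
--     return total
-- ===== Notes on version B (the rewrite author's own statement) =====
-- stated objective: alternative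
-- what changed: Replaces the char-by-char state machine (count + in_quotes toggle) by splitting the string on '"' and summing per-character matches over the even-indexed (outside-quotes) segments.
import Mathlib
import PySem

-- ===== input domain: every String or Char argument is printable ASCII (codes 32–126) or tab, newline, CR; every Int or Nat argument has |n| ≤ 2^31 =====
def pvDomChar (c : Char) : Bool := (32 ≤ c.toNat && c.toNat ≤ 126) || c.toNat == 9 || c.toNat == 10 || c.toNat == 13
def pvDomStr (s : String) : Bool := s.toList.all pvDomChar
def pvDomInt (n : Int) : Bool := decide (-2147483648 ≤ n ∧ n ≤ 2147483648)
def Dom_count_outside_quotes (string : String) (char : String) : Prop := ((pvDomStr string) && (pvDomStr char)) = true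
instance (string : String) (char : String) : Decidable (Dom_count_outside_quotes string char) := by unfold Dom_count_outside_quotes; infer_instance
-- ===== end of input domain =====

-- B replaces A's char-by-char in_quotes state machine by split-on-'"' and summing
-- per-character matches over even-indexed segments (objective: alternative, same cost).

-- ===== PORT A =====
-- literal port of A: fold over the characters with state (count, in_quotes)
def count_outside_quotes (string : String) (char : String) : Int :=
  (string.toList.foldl
    (fun st c =>
      if c == '"' then (st.1, !st.2)
      else if String.mk [c] == char && !st.2 then (st.1 + 1, st.2)
      else st)
    ((0 : Int), false)).1

-- ===== PORT B =====
-- literal port of B: split on '"', then for each (i, seg) with i % 2 == 0 add the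
-- number of characters of seg equal to char
def count_outside_quotes_alt (string : String) (char : String) : Int :=
  (PySem.List.enumerate (PySem.Chars.splitOn string.toList ['"']) 0).foldl
    (fun total p =>
      if p.1 % 2 == 0 then
        total + (((p.2.filter (fun c => String.mk [c] == char)).length : Int))
      else total)
    0

-- ===== PRECONDITION & SPEC =====
def Spec_count_outside_quotes (string : String) (char : String) (out : Int) : Prop := out = count_outside_quotes_alt string char
instance (string : String) (char : String) (out : Int) : Decidable (Spec_count_outside_quotes string char out) := by unfold Spec_count_outside_quotes; infer_instance

-- ===== CLAIM (what is proved, stated in full; the proofs are below) =====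
def Claim_equal_count_outside_quotes : Prop := ∀ (string : String) (char : String), Dom_count_outside_quotes string char → Spec_count_outside_quotes string char (count_outside_quotes string char)

-- ===== LEMMAS AND PROOFS =====

-- reference splitter: structural version of str.split('"')
def mySplit : List Char → List (List Char)
  | [] => [[]]
  | c :: rest =>
    if c = '"' then [] :: mySplit rest
    else
      match mySplit rest with
      | s :: ss => (c :: s) :: ss
      | [] => [[c]]

theorem mySplit_ne_nil (l : List Char) : mySplit l ≠ [] := by
  cases l with
  | nil => simp [mySplit]
  | cons c rest =>
    simp only [mySplit]
    split
    · simp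
    · split <;> simp_all

-- number of characters of segment s equal to char
def cntSeg (char : String) (s : List Char) : Nat :=
  (s.filter (fun c => String.mk [c] == char)).length

-- alternating sum: add cntSeg on segments where the flag is true, flipping each step
def sumP (char : String) : Bool → List (List Char) → Int
  | _, [] => 0
  | b, s :: ss => (if b then (cntSeg char s : Int) else 0) + sumP char (!b) ss

theorem splitOn_go_eq :
    ∀ (fuel : Nat) (l cur : List Char) (acc : List (List Char)), l.length < fuel →
      PySem.Chars.splitOn.go ['"'] fuel l cur acc =
        acc.reverse ++ (match mySplit l with
                        | s :: ss => (cur.reverse ++ s) :: ss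
                        | [] => [cur.reverse]) := by
  intro fuel
  induction fuel with
  | zero => intro l cur acc h; omega
  | succ n ih =>
    intro l cur acc h
    cases l with
    | nil =>
      rw [PySem.Chars.splitOn.go.eq_def]
      simp [mySplit]
    | cons c rest =>
      rw [PySem.Chars.splitOn.go.eq_def]
      simp only [List.length_cons] at h
      by_cases hc : c = '"'
      · subst hc
        have hp : (['"'].isPrefixOf ('"' :: rest)) = true := by simp [List.isPrefixOf]
        simp only [hp, if_true, List.length_singleton, List.drop_succ_cons, List.drop_zero]
        rw [ih rest [] (cur.reverse :: acc) (by omega)]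
        have hq : mySplit ('"' :: rest) = [] :: mySplit rest := by simp [mySplit]
        rw [hq]
        cases hms : mySplit rest with
        | nil => exact absurd hms (mySplit_ne_nil rest)
        | cons s ss => simp
      · have hp : (['"'].isPrefixOf (c :: rest)) = false := by
          simp [List.isPrefixOf]
          intro h'
          exact absurd h'.symm hc
        simp only [hp, Bool.false_eq_true, if_false]
        rw [ih rest (c :: cur) acc (by omega)]
        have hq : mySplit (c :: rest)
            = match mySplit rest with | s :: ss => (c :: s) :: ss | [] => [[c]] := by
          simp [mySplit, hc]
        rw [hq]
        cases hms : mySplit rest with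
        | nil => exact absurd hms (mySplit_ne_nil rest)
        | cons s ss => simp

theorem splitOn_eq_mySplit (l : List Char) :
    PySem.Chars.splitOn l ['"'] = mySplit l := by
  show PySem.Chars.splitOn.go ['"'] (l.length + 1) l [] [] = mySplit l
  rw [splitOn_go_eq (l.length + 1) l [] [] (by omega)]
  cases hms : mySplit l with
  | nil => exact absurd hms (mySplit_ne_nil l)
  | cons s ss => simp

-- B's enumerate-foldl computes the alternating sum, flag = (start index even)
theorem foldB_eq_sumP (char : String) :
    ∀ (ss : List (List Char)) (k : Int) (acc : Int), 0 ≤ k →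
      (PySem.List.enumerate ss k).foldl
        (fun total p =>
          if p.1 % 2 == 0 then
            total + (((p.2.filter (fun c => String.mk [c] == char)).length : Int))
          else total) acc
      = acc + sumP char (k % 2 == 0) ss := by
  intro ss
  induction ss with
  | nil => intro k acc hk; simp [PySem.List.enumerate_nil, sumP]
  | cons s ss ih =>
    intro k acc hk
    rw [PySem.List.enumerate_cons, List.foldl_cons, ih (k + 1) _ (by omega)]
    have hpar : ((k + 1) % 2 == 0) = !(k % 2 == 0) := by
      rcases Int.emod_two_eq_zero_or_one k with h | h
      · simp [h, Int.add_mul_emod_self_left]; omega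
      · simp [h]; omega
    simp only [sumP, hpar, cntSeg]
    by_cases h : (k % 2 == 0) = true <;> simp [h] <;> ring

-- A's fold computes the alternating sum over mySplit, flag = (not in_quotes)
theorem foldA_eq_sumP (char : String) :
    ∀ (l : List Char) (cnt : Int) (inq : Bool),
      (l.foldl
        (fun st c =>
          if c == '"' then (st.1, !st.2)
          else if String.mk [c] == char && !st.2 then (st.1 + 1, st.2)
          else st) (cnt, inq)).1
      = cnt + sumP char (!inq) (mySplit l) := by
  intro l
  induction l with
  | nil =>
    intro cnt inq
    simp [mySplit, sumP, cntSeg]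
  | cons c rest ih =>
    intro cnt inq
    by_cases hc : c = '"'
    · subst hc
      simp only [List.foldl_cons, beq_self_eq_true, if_true]
      rw [ih cnt (!inq)]
      simp only [mySplit, if_pos rfl, sumP, cntSeg, List.filter_nil, List.length_nil]
      cases inq <;> simp [sumP, cntSeg]
    · have hcb : (c == '"') = false := by simp [hc]
      simp only [List.foldl_cons, hcb, Bool.false_eq_true, if_false]
      cases hms : mySplit rest with
      | nil => exact absurd hms (mySplit_ne_nil rest)
      | cons s ss =>
        by_cases hm : (String.mk [c] == char) = true
        · cases inq with
          | false =>
            simp only [hm, Bool.not_false, Bool.and_true, if_true, Bool.true_and]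
            rw [ih (cnt + 1) false]
            simp only [mySplit, if_neg hc, hms, sumP, Bool.not_false, if_true, cntSeg,
              List.filter_cons, hm, if_pos, List.length_cons]
            push_cast
            ring
          | true =>
            simp only [Bool.not_true, Bool.and_false, Bool.false_eq_true, if_false]
            rw [ih cnt true]
            simp only [mySplit, if_neg hc, hms, sumP, Bool.not_true, if_false, cntSeg]
            simp
        · have hm' : (String.mk [c] == char) = false := by simpa using hm
          simp only [hm', Bool.false_and, Bool.false_eq_true, if_false]
          rw [ih cnt inq]
          simp only [mySplit, if_neg hc, hms, sumP, cntSeg, List.filter_cons, hm',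
            Bool.false_eq_true, if_false]

-- ===== VERDICT (by name: the statement is the Claim_ definition above) =====
theorem count_outside_quotes_spec : Claim_equal_count_outside_quotes := by
  intro string char _
  show count_outside_quotes string char = count_outside_quotes_alt string char
  unfold count_outside_quotes count_outside_quotes_alt
  rw [splitOn_eq_mySplit, foldA_eq_sumP char string.toList 0 false,
    foldB_eq_sumP char (mySplit string.toList) 0 0 (by omega)]
  norm_num
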